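-- pv_equiv track=rewrite | github.com/smtmRadu/CompanyClassifierFoundationModel | test.py | has_common_substring
-- ===== SOURCE A (Python) =====
-- def has_common_substring(a: str, b: str, min_len: int = 4) -> bool:
--     """
--     Returns True if strings a and b share any substring of at least min_len characters.
--     Uses a sliding window and set intersection for efficiency.
--     """
--     # If either string is shorter than min_len, no common substring of length min_len can exist
--     if len(a) < min_len or len(b) < min_len:
--         return False
--
--     # Generate all substrings of length min_len from string `a`
--     substrings_a = {a[i:i + min_len] for i in range(len(a) - min_len + 1)}
--
--     # Check if any of those substrings are in string `b`
--     for i in range(len(b) - min_len + 1):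
--         if b[i:i + min_len] in substrings_a:
--             return True
--
--     return False
-- ===== SOURCE B (Python) =====
-- def has_common_substring(a: str, b: str, min_len: int = 4) -> bool:
--     """
--     Returns True if strings a and b share any substring of at least min_len characters.
--     Suffix scan: walk the suffixes of a and test the min_len-prefix of the current
--     suffix directly against b with Python's substring search; no set of windows,
--     no index ranges, no enumeration of b's windows.
--     """
--     if len(a) < min_len or len(b) < min_len:
--         return False
--     i = 0
--     while not (len(a) - i < min_len):   # while the suffix a[i:] is long enough
--         if a[i:][:min_len] in b:        # window = min_len-prefix of the suffix
--             return True
--         i += 1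
--     return False
-- ===== Notes on version B (the rewrite author's own statement) =====
-- stated objective: alternative
-- what changed: A builds a set of all length-min_len windows of a and then enumerates b's windows to probe that index; B instead walks the suffixes of a with a single while loop and tests each suffix's min_len-prefix directly against b with Python's substring search, so there is no set, no range over b, and no enumeration of b's windows.
import Mathlib
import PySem

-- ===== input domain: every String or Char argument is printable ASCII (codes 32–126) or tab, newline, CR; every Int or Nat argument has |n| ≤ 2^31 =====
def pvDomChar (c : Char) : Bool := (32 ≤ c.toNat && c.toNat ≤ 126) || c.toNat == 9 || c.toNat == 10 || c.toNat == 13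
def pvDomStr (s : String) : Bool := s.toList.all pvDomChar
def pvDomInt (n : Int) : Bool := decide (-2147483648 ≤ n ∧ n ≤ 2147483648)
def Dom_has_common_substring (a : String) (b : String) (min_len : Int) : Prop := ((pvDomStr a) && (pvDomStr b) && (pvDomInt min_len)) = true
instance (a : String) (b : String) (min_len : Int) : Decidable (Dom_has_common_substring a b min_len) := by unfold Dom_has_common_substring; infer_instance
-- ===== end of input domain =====

-- B replaces A's precomputed set of a's windows plus a scan of b's windows by a
-- suffix scan of a that tests each suffix's min_len-prefix directly against b with
-- Python's substring search (objective: alternative decomposition; no speed claim).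


-- ===== PORT A =====
-- literal transliteration of A: length guard, set comprehension of a's windows,
-- then a scan of b's windows with early return = List.any
def has_common_substring (a : String) (b : String) (min_len : Int) : Bool :=
  if PySem.Str.len a < min_len ∨ PySem.Str.len b < min_len then false
  else
    let substrings_a : PySem.Set (List Char) :=
      PySem.Set.ofList ((PySem.List.pyRange 0 (PySem.Str.len a - min_len + 1)).map
        (fun i => PySem.List.slice a.toList (some i) (some (i + min_len))))
    (PySem.List.pyRange 0 (PySem.Str.len b - min_len + 1)).any
      (fun i => PySem.Set.contains substrings_a (PySem.List.slice b.toList (some i) (some (i + min_len))))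

-- ===== PORT B =====
-- the while loop over the suffixes of a, as its structural recursion:
-- stop (False) when the suffix is shorter than m, test the suffix's m-prefix in b,
-- else step to the next suffix (the [] fallthrough is unreachable: the guard stops first
-- for m > 0, and for m ≤ 0 the empty window is found in b)
def pvScanB (a : List Char) (b : List Char) (m : Int) : Bool :=
  if (a.length : Int) < m then false
  else if PySem.Chars.isIn (PySem.List.slice a none (some m)) b then true
  else
    match a with
    | [] => false
    | _ :: rest => pvScanB rest b m

-- literal transliteration of B: same length guard, then the suffix scan
def has_common_substring_alt (a : String) (b : String) (min_len : Int) : Bool :=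
  if PySem.Str.len a < min_len ∨ PySem.Str.len b < min_len then false
  else pvScanB a.toList b.toList min_len

-- ===== PRECONDITION & SPEC =====
def Spec_has_common_substring (a : String) (b : String) (min_len : Int) (out : Bool) : Prop := out = has_common_substring_alt a b min_len
instance (a : String) (b : String) (min_len : Int) (out : Bool) : Decidable (Spec_has_common_substring a b min_len out) := by unfold Spec_has_common_substring; infer_instance

-- ===== CLAIM (what is proved, stated in full; the proofs are below) =====
def Claim_equal_has_common_substring : Prop := ∀ (a : String) (b : String) (min_len : Int), Dom_has_common_substring a b min_len → Spec_has_common_substring a b min_len (has_common_substring a b min_len)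

-- ===== LEMMAS AND PROOFS =====

-- the window s[i:i+m] for i a nonnegative index and 0 < m
theorem slice_window (xs : List Char) (i m : Int) (h0 : 0 ≤ i) (hm : 0 < m) :
    PySem.List.slice xs (some i) (some (i + m)) =
      List.take m.toNat (List.drop i.toNat xs) := by
  rw [PySem.List.slice_toNat xs h0 (by omega)]
  congr 1
  omega

-- for a degenerate window length the scan always succeeds (an empty window occurs)
theorem scanB_nonpos (a b : List Char) (m : Int) (hm : m ≤ 0) :
    pvScanB a b m = true := by
  induction a with
  | nil =>
    unfold pvScanB
    rw [if_neg (by simp; omega)]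
    have : PySem.List.slice ([] : List Char) none (some m) = [] := by
      simp [PySem.List.slice]
    rw [this, if_pos (PySem.Chars.isIn_nil b)]
  | cons c t ih =>
    unfold pvScanB
    rw [if_neg (by simp; omega)]
    split_ifs with h
    · rfl
    · exact ih

-- characterisation of the suffix scan for a positive window length
theorem scanB_iff_pos (a b : List Char) (m : Int) (hm : 0 < m) :
    pvScanB a b m = true ↔
      ∃ i : ℕ, i + m.toNat ≤ a.length ∧
        PySem.Chars.isIn (List.take m.toNat (List.drop i a)) b = true := by
  induction a with
  | nil =>
    unfold pvScanB
    rw [if_pos (by simp; omega)]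
    simp only [Bool.false_eq_true, false_iff]
    rintro ⟨i, hi, _⟩
    simp at hi
    omega
  | cons c t ih =>
    unfold pvScanB
    have hmn : (m.toNat : Int) = m := Int.toNat_of_nonneg hm.le
    split_ifs with hlen hocc
    · simp only [false_iff]
      rintro ⟨i, hi, _⟩
      simp only [List.length_cons] at hlen hi
      omega
    · simp only [true_iff]
      refine ⟨0, ?_, ?_⟩
      · simp only [List.length_cons] at hlen ⊢
        omega
      · rw [List.drop_zero]
        rwa [PySem.List.slice_to _ hm.le] at hocc
    · rw [ih]
      constructor
      · rintro ⟨i, hi, h⟩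
        refine ⟨i + 1, ?_, by simpa using h⟩
        simp only [List.length_cons]
        omega
      · rintro ⟨i, hi, h⟩
        cases i with
        | zero =>
          rw [List.drop_zero] at h
          rw [PySem.List.slice_to _ hm.le] at hocc
          exact absurd h hocc
        | succ i' =>
          refine ⟨i', ?_, by simpa using h⟩
          simp only [List.length_cons] at hi
          omega

-- core equivalence once the guard has passed: A's set-and-scan equals B's suffix scan
theorem scans_agree (al bl : List Char) (m : Int)
    (ha : m ≤ (al.length : Int)) (_hb : m ≤ (bl.length : Int)) :
    ((PySem.List.pyRange 0 ((bl.length : Int) - m + 1)).any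
      (fun i => PySem.Set.contains
        (PySem.Set.ofList ((PySem.List.pyRange 0 ((al.length : Int) - m + 1)).map
          (fun i => PySem.List.slice al (some i) (some (i + m)))))
        (PySem.List.slice bl (some i) (some (i + m)))))
    = pvScanB al bl m := by
  by_cases hm : m ≤ 0
  · -- degenerate window: both sides are true
    rw [scanB_nonpos al bl m hm, List.any_eq_true]
    have hslice : ∀ (xs : List Char), PySem.List.slice xs (some (-m)) (some (-m + m)) = [] := by
      intro xs
      rw [neg_add_cancel, PySem.List.slice_toNat xs (by omega) (by omega)]
      simp
    refine ⟨-m, PySem.List.mem_pyRange_one.mpr (by omega), ?_⟩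
    rw [hslice bl, PySem.Set.contains_iff, PySem.Set.mem_ofList]
    exact List.mem_map.mpr ⟨-m, PySem.List.mem_pyRange_one.mpr (by omega), hslice al⟩
  · push Not at hm
    rw [Bool.eq_iff_iff, List.any_eq_true, scanB_iff_pos al bl m hm]
    constructor
    · rintro ⟨i, hi, hc⟩
      rw [PySem.Set.contains_iff, PySem.Set.mem_ofList, List.mem_map] at hc
      obtain ⟨i', hi', heq⟩ := hc
      rw [PySem.List.mem_pyRange_one] at hi hi'
      refine ⟨i'.toNat, by omega, ?_⟩
      rw [← slice_window al i' m hi'.1 hm, heq, slice_window bl i m hi.1 hm,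
        ← PySem.Chars.exists_prefix_drop_iff_isIn]
      exact ⟨i.toNat, List.take_prefix _ _⟩
    · rintro ⟨i', hi', hin⟩
      obtain ⟨j, hpre⟩ := (PySem.Chars.exists_prefix_drop_iff_isIn _ bl).mpr hin
      have hlen : (List.take m.toNat (List.drop i' al)).length = m.toNat := by
        simp; omega
      have hjb : j + m.toNat ≤ bl.length := by
        have := hpre.length_le
        simp [hlen] at this
        omega
      refine ⟨(j : Int), PySem.List.mem_pyRange_one.mpr (by omega), ?_⟩
      rw [PySem.Set.contains_iff, PySem.Set.mem_ofList, slice_window bl (j:Int) m (by omega) hm]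
      have : List.take m.toNat (List.drop i' al)
          = List.take m.toNat (List.drop ((j:Int)).toNat bl) := by
        rw [List.prefix_iff_eq_take.mp hpre, hlen]
        simp
      rw [← this]
      refine List.mem_map.mpr ⟨(i' : Int), PySem.List.mem_pyRange_one.mpr (by omega), ?_⟩
      rw [slice_window al (i' : Int) m (by omega) hm]
      simp

-- ===== VERDICT (by name: the statement is the Claim_ definition above) =====
theorem has_common_substring_spec : Claim_equal_has_common_substring := by
  intro a b min_len _
  unfold Spec_has_common_substring has_common_substring has_common_substring_alt
  split_ifs with h
  · rfl
  · push Not at h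
    rw [PySem.Str.len_eq] at h
    simp only [PySem.Str.len_eq]
    exact scans_agree a.toList b.toList min_len h.1 h.2
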